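-- pv_equiv track=rewrite | github.com/Li4N/Codigos-DAA | todo.py | DyVCifrasComunes
-- ===== SOURCE A (Python) =====
-- def ExtraerCifras (numero):
--     resultado = [False]*10
--     while (numero>0):
--         cifra = numero % 10
--         numero = numero // 10
--         resultado[cifra]=True
--     return resultado
--
-- def CombinarResultados (resultado1, resultado2):
--     resultado = [False] * 10
--     for i in range (0,10):
--         resultado[i]=resultado1[i] and resultado2[i]
--     return resultado
--
-- def DyVCifrasComunes (vector, ini, fin):
--     if (ini==fin):
--         resultado = ExtraerCifras (vector[ini])
--         return resultado
--     else:
--         mitad = (ini+fin) //2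
--         resultado1 = DyVCifrasComunes (vector, ini,mitad)
--         resultado2 = DyVCifrasComunes (vector, mitad+1, fin)
--         #Combinacion
--         resultado = CombinarResultados (resultado1, resultado2)
--         return resultado
-- ===== SOURCE B (Python) =====
-- def _Digits(numero):
--     cifras = set()
--     while numero > 0:
--         cifras.add(numero % 10)
--         numero //= 10
--     return cifras
--
-- def DyVCifrasComunes(vector, ini, fin):
--     common = _Digits(vector[ini])
--     for i in range(ini + 1, fin + 1):
--         common &= _Digits(vector[i])
--     return [d in common for d in range(10)]
-- ===== Notes on version B (the rewrite author's own statement) =====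
-- stated objective: simpler
-- what changed: Replaces the divide-and-conquer recursion that ANDs 10-bool masks with a single left-to-right loop maintaining one running set of common digits, converted to the bool list only at the end.
import Mathlib
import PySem

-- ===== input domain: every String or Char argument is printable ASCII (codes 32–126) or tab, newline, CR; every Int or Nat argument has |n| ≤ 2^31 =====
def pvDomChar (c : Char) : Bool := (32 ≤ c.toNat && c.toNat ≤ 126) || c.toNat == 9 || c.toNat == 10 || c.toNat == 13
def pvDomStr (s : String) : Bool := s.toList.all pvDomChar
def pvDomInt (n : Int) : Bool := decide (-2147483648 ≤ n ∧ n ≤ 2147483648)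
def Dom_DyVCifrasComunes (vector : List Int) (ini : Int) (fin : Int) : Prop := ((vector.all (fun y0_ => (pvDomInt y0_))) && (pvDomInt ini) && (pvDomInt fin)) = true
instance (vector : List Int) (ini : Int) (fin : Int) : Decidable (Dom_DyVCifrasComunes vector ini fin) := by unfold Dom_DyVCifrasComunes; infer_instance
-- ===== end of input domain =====

-- B replaces A's divide-and-conquer mask-ANDing with one linear pass keeping a running set
-- of common digits (objective: simpler); return values agree on Pre_ (where A returns).

-- ===== PORT A =====
-- while (numero>0): resultado[numero%10]=True; numero//=10
def pvLoopA (numero : Int) (resultado : List Bool) : List Bool :=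
  if 0 < numero then
    pvLoopA (PySem.Int.floordiv numero 10)
      (PySem.List.pySetD resultado (PySem.Int.mod numero 10) true)
  else resultado
termination_by numero.toNat
decreasing_by
  rename_i h
  have h10 : PySem.Int.floordiv numero 10 = numero / 10 :=
    PySem.Int.floordiv_eq_ediv_of_pos (by omega)
  omega

def ExtraerCifras (numero : Int) : List Bool :=
  pvLoopA numero (List.replicate 10 false)

def CombinarResultados (resultado1 resultado2 : List Bool) : List Bool :=
  (PySem.List.pyRange 0 10 1).foldl
    (fun resultado i =>
      PySem.List.pySetD resultado i
        ((PySem.List.pyGetD resultado1 i false) && (PySem.List.pyGetD resultado2 i false)))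
    (List.replicate 10 false)

-- fuel makes the non-terminating case (ini > fin, excluded by Pre_) total; inside Pre_
-- the fuel (fin-ini).toNat+1 is never exhausted (interval length shrinks each split).
def pvDyV (vector : List Int) : Nat → Int → Int → List Bool
  | 0, _, _ => []
  | fuel+1, ini, fin =>
    if ini == fin then ExtraerCifras (PySem.List.pyGetD vector ini 0)
    else
      let mitad := PySem.Int.floordiv (ini + fin) 2
      CombinarResultados (pvDyV vector fuel ini mitad) (pvDyV vector fuel (mitad + 1) fin)

def DyVCifrasComunes (vector : List Int) (ini : Int) (fin : Int) : List Bool :=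
  pvDyV vector ((fin - ini).toNat + 1) ini fin

-- ===== PORT B =====
-- while numero > 0: cifras.add(numero % 10); numero //= 10
def pvDigitsLoop (numero : Int) (cifras : PySem.Set Int) : PySem.Set Int :=
  if 0 < numero then
    pvDigitsLoop (PySem.Int.floordiv numero 10)
      (PySem.Set.add cifras (PySem.Int.mod numero 10))
  else cifras
termination_by numero.toNat
decreasing_by
  rename_i h
  have h10 : PySem.Int.floordiv numero 10 = numero / 10 :=
    PySem.Int.floordiv_eq_ediv_of_pos (by omega)
  omega

def pvDigits (numero : Int) : PySem.Set Int :=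
  pvDigitsLoop numero PySem.Set.empty

def DyVCifrasComunes_alt (vector : List Int) (ini : Int) (fin : Int) : List Bool :=
  let common :=
    (PySem.List.pyRange (ini + 1) (fin + 1) 1).foldl
      (fun common i => PySem.Set.inter common (pvDigits (PySem.List.pyGetD vector i 0)))
      (pvDigits (PySem.List.pyGetD vector ini 0))
  (PySem.List.pyRange 0 10 1).map (fun d => PySem.Set.contains common d)

-- ===== PRECONDITION & SPEC =====
-- Pre_ excludes exactly the inputs where Python A raises: ini > fin (unbounded recursion,
-- RecursionError) and indices in [ini, fin] outside Python's valid index range (IndexError).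
def Pre_DyVCifrasComunes (vector : List Int) (ini : Int) (fin : Int) : Prop :=
  ini ≤ fin ∧ -(vector.length : Int) ≤ ini ∧ fin < (vector.length : Int)
instance (vector : List Int) (ini : Int) (fin : Int) : Decidable (Pre_DyVCifrasComunes vector ini fin) := by unfold Pre_DyVCifrasComunes; infer_instance

def pvWitness_DyVCifrasComunes : List Int × Int × Int := ([12, 21, 102], 0, 2)

def Spec_DyVCifrasComunes (vector : List Int) (ini : Int) (fin : Int) (out : List Bool) : Prop := out = DyVCifrasComunes_alt vector ini fin
instance (vector : List Int) (ini : Int) (fin : Int) (out : List Bool) : Decidable (Spec_DyVCifrasComunes vector ini fin out) := by unfold Spec_DyVCifrasComunes; infer_instance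

-- ===== CLAIM (what is proved, stated in full; the proofs are below) =====
def Claim_equal_DyVCifrasComunes : Prop := ∀ (vector : List Int) (ini : Int) (fin : Int), Dom_DyVCifrasComunes vector ini fin → Pre_DyVCifrasComunes vector ini fin → Spec_DyVCifrasComunes vector ini fin (DyVCifrasComunes vector ini fin)

-- ===== LEMMAS AND PROOFS =====

-- "digit d occurs in the decimal expansion traversed by both ports' while-loops"
def hasDigit (d : Int) (n : Int) : Bool :=
  if 0 < n then (PySem.Int.mod n 10 == d) || hasDigit d (PySem.Int.floordiv n 10)
  else false
termination_by n.toNat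
decreasing_by
  rename_i h
  have h10 : PySem.Int.floordiv n 10 = n / 10 :=
    PySem.Int.floordiv_eq_ediv_of_pos (by omega)
  omega

theorem mem_pvDigitsLoop (n : Int) (s : PySem.Set Int) (d : Int) :
    (d ∈ pvDigitsLoop n s) ↔ (d ∈ s ∨ hasDigit d n = true) := by
  induction n, s using pvDigitsLoop.induct with
  | case1 n s h ih =>
    rw [pvDigitsLoop, if_pos h, hasDigit, if_pos h, ih]
    simp only [PySem.Set.mem_add, Bool.or_eq_true, beq_iff_eq]
    constructor
    · rintro ((hs | he) | hd)
      · exact Or.inl hs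
      · exact Or.inr (Or.inl he.symm)
      · exact Or.inr (Or.inr hd)
    · rintro (hs | he | hd)
      · exact Or.inl (Or.inl hs)
      · exact Or.inl (Or.inr he.symm)
      · exact Or.inr hd
  | case2 n s h =>
    rw [pvDigitsLoop, if_neg h, hasDigit, if_neg h]
    simp

theorem mem_pvDigits (n d : Int) : (d ∈ pvDigits n) ↔ hasDigit d n = true := by
  rw [pvDigits, mem_pvDigitsLoop]
  simp [PySem.Set.empty]

theorem mod10_bounds (n : Int) (_h : 0 < n) :
    0 ≤ PySem.Int.mod n 10 ∧ PySem.Int.mod n 10 < 10 := by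
  rw [PySem.Int.mod_eq_emod_of_pos (by omega)]
  omega

theorem pvLoopA_eq (n : Int) (acc : List Bool) :
    acc.length = 10 →
    pvLoopA n acc = (List.range 10).map (fun k => acc.getD k false || hasDigit (k : Int) n) := by
  induction n, acc using pvLoopA.induct with
  | case1 n acc h ih =>
    intro hlen
    have hc := mod10_bounds n h
    rw [pvLoopA, if_pos h, ih (by simp [PySem.List.length_pySetD, hlen])]
    apply List.map_congr_left
    intro k hk
    have hk10 : k < 10 := List.mem_range.mp hk
    rw [PySem.List.pySetD_of_nonneg acc true hc.1]
    conv_rhs => rw [hasDigit, if_pos h]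
    by_cases hkc : k = (PySem.Int.mod n 10).toNat
    · have hck : PySem.Int.mod n 10 = (k : Int) := by omega
      rw [List.getD_eq_getElem?_getD, List.getElem?_set, if_pos hkc.symm,
        if_pos (by omega), Option.getD_some, hck]
      simp
    · have hck : PySem.Int.mod n 10 ≠ (k : Int) := by omega
      have hb : (PySem.Int.mod n 10 == (k : Int)) = false := beq_eq_false_iff_ne.mpr hck
      rw [List.getD_eq_getElem?_getD, List.getElem?_set, if_neg (by omega), hb]
      simp
  | case2 n acc h =>
    intro hlen
    rw [pvLoopA, if_neg h]
    apply List.ext_getElem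
    · simp [hlen]
    · intro i h1 h2
      have hi10 : i < 10 := by simpa [hlen] using h1
      rw [List.getElem_map, List.getElem_range, hasDigit, if_neg h, Bool.or_false,
        List.getD_eq_getElem acc false (by omega)]

theorem ExtraerCifras_eq (n : Int) :
    ExtraerCifras n = (List.range 10).map (fun k : Nat => hasDigit (k : Int) n) := by
  rw [ExtraerCifras, pvLoopA_eq n _ (by simp)]
  apply List.map_congr_left
  intro k hk
  have hk10 : k < 10 := List.mem_range.mp hk
  rw [List.getD_eq_getElem _ false (by simpa using hk10), List.getElem_replicate,
    Bool.false_or]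

-- the fold of Python's "resultado[i] = …" over range(0,10): elementwise characterisation
theorem foldl_pySetD_eq (h : Int → Bool) (a b : Int) (res : List Bool)
    (ha : 0 ≤ a) (hb : b ≤ (res.length : Int)) :
    (PySem.List.pyRange a b 1).foldl (fun r i => PySem.List.pySetD r i (h i)) res
      = (List.range res.length).map
          (fun k : Nat => if a ≤ (k : Int) ∧ (k : Int) < b then h (k : Int) else res.getD k false) := by
  by_cases hab : b ≤ a
  · rw [PySem.List.pyRange_one_eq_nil hab, List.foldl_nil]
    apply List.ext_getElem
    · simp
    · intro i h1 h2
      have : ¬ (a ≤ (i : Int) ∧ (i : Int) < b) := by omega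
      rw [List.getElem_map, List.getElem_range, if_neg this,
        List.getD_eq_getElem res false h1]
  · have hlt : a < b := by omega
    rw [PySem.List.pyRange_one_cons hlt, List.foldl_cons]
    have hlen' : (PySem.List.pySetD res a (h a)).length = res.length :=
      PySem.List.length_pySetD res a (h a)
    have := foldl_pySetD_eq h (a + 1) b (PySem.List.pySetD res a (h a)) (by omega)
      (by omega)
    rw [this, hlen']
    apply List.map_congr_left
    intro k hk
    have hk' : k < res.length := List.mem_range.mp hk
    rw [PySem.List.pySetD_of_nonneg res (h a) ha]
    by_cases hka : (k : Int) = a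
    · have hak : a.toNat = k := by omega
      have h1 : ¬ (a + 1 ≤ (k : Int) ∧ (k : Int) < b) := by omega
      have h2 : a ≤ (k : Int) ∧ (k : Int) < b := by omega
      rw [if_neg h1, if_pos h2, List.getD_eq_getElem?_getD, List.getElem?_set,
        if_pos hak, if_pos (by omega), Option.getD_some, hka]
    · have hak : ¬ (a.toNat = k) := by omega
      by_cases h1 : a + 1 ≤ (k : Int) ∧ (k : Int) < b
      · rw [if_pos h1, if_pos (by omega)]
      · rw [if_neg h1, if_neg (by omega), List.getD_eq_getElem?_getD,
          List.getD_eq_getElem?_getD, List.getElem?_set, if_neg hak]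
termination_by (b - a).toNat
decreasing_by omega

theorem pyGetD_map_range10 (f : Nat → Bool) (k : Nat) (hk : k < 10) :
    PySem.List.pyGetD ((List.range 10).map f) (k : Int) false = f k := by
  rw [PySem.List.pyGetD_of_nonneg _ false (by omega), Int.toNat_natCast,
    List.getD_eq_getElem _ false (by simpa using hk), List.getElem_map, List.getElem_range]

theorem Combinar_eq (f g : Nat → Bool) :
    CombinarResultados ((List.range 10).map f) ((List.range 10).map g)
      = (List.range 10).map (fun k => f k && g k) := by
  rw [CombinarResultados, foldl_pySetD_eq _ 0 10 _ (by omega) (by simp)]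
  simp only [List.length_replicate]
  apply List.map_congr_left
  intro k hk
  have hk10 : k < 10 := List.mem_range.mp hk
  rw [if_pos (by omega), pyGetD_map_range10 f k hk10, pyGetD_map_range10 g k hk10]

-- common-digit predicate over the index interval [ini, fin]
def comD (vector : List Int) (ini fin d : Int) : Bool :=
  (PySem.List.pyRange ini (fin + 1) 1).all (fun i => hasDigit d (PySem.List.pyGetD vector i 0))

theorem comD_single (vector : List Int) (ini : Int) (d : Int) :
    comD vector ini ini d = hasDigit d (PySem.List.pyGetD vector ini 0) := by
  rw [comD, PySem.List.pyRange_one_singleton]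
  simp

theorem comD_split (vector : List Int) (ini mitad fin d : Int)
    (h1 : ini ≤ mitad) (h2 : mitad < fin) :
    comD vector ini fin d = (comD vector ini mitad d && comD vector (mitad + 1) fin d) := by
  rw [comD, comD, comD,
    PySem.List.pyRange_one_append ini (mitad + 1) (fin + 1) (by omega) (by omega),
    List.all_append]

theorem pvDyV_eq (vector : List Int) (fuel : Nat) :
    ∀ (ini fin : Int), (fin - ini).toNat < fuel → ini ≤ fin →
    pvDyV vector fuel ini fin = (List.range 10).map (fun k : Nat => comD vector ini fin (k : Int)) := by
  induction fuel with
  | zero => intro ini fin hf _; omega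
  | succ F ih =>
    intro ini fin hf hle
    by_cases h : ini = fin
    · subst h
      rw [pvDyV]
      simp only [BEq.rfl, if_true]
      rw [ExtraerCifras_eq]
      apply List.map_congr_left
      intro k _
      rw [comD_single]
    · rw [pvDyV]
      have hne : (ini == fin) = false := by simp [h]
      rw [hne]
      simp only [Bool.false_eq_true, if_false]
      have hm := PySem.Int.floordiv_two_mid_bounds hle
      have hmlt : PySem.Int.floordiv (ini + fin) 2 < fin := by
        rw [PySem.Int.floordiv_lt_iff_lt_mul (by omega)]
        omega
      rw [ih ini (PySem.Int.floordiv (ini + fin) 2) (by omega) hm.1,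
        ih (PySem.Int.floordiv (ini + fin) 2 + 1) fin (by omega) (by omega),
        Combinar_eq]
      apply List.map_congr_left
      intro k _
      rw [← comD_split vector ini (PySem.Int.floordiv (ini + fin) 2) fin (k : Int) hm.1 hmlt]

theorem foldl_inter_mem (f : Int → PySem.Set Int) (l : List Int) (s : PySem.Set Int) (d : Int) :
    (d ∈ l.foldl (fun s i => PySem.Set.inter s (f i)) s) ↔ (d ∈ s ∧ ∀ i ∈ l, d ∈ f i) := by
  induction l generalizing s with
  | nil => simp
  | cons x xs ih =>
    rw [List.foldl_cons, ih]
    simp only [PySem.Set.mem_inter, List.mem_cons]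
    constructor
    · rintro ⟨⟨hs, hx⟩, hxs⟩
      refine ⟨hs, ?_⟩
      rintro i (rfl | hi)
      · exact hx
      · exact hxs i hi
    · rintro ⟨hs, hall⟩
      exact ⟨⟨hs, hall x (Or.inl rfl)⟩, fun i hi => hall i (Or.inr hi)⟩

theorem alt_eq (vector : List Int) (ini fin : Int) (hle : ini ≤ fin) :
    DyVCifrasComunes_alt vector ini fin
      = (List.range 10).map (fun k : Nat => comD vector ini fin (k : Int)) := by
  rw [DyVCifrasComunes_alt]
  have hr : PySem.List.pyRange 0 10 1 = (List.range 10).map (fun k : Nat => (k : Int)) := by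
    decide
  rw [hr, List.map_map]
  apply List.map_congr_left
  intro k _
  simp only [Function.comp]
  show PySem.Set.contains _ (k : Int) = comD vector ini fin (k : Int)
  rw [Bool.eq_iff_iff, PySem.Set.contains_iff, foldl_inter_mem, comD,
    PySem.List.pyRange_one_cons (show ini < fin + 1 by omega), List.all_cons]
  simp only [Bool.and_eq_true, List.all_eq_true, mem_pvDigits]

-- ===== VERDICT (by name: the statement is the Claim_ definition above) =====
theorem DyVCifrasComunes_spec : Claim_equal_DyVCifrasComunes := by
  intro vector ini fin _ hpre
  unfold Spec_DyVCifrasComunes DyVCifrasComunes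
  rw [alt_eq vector ini fin hpre.1]
  exact pvDyV_eq vector _ ini fin (by omega) hpre.1
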